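-- pv_equiv track=rewrite | github.com/tgandor/meats | toys/math/flip_solver.py | make_vars
-- ===== SOURCE A (Python) =====
-- def make_vars(board):
--     n = 0
--     out_vars = []
--     reverse = {}
--     for y, row in enumerate(board):
--         out_row = []
--         for x, _ in enumerate(row):
--             n += 1
--             out_row.append(n)
--             reverse[n] = (y, x)
--         out_vars.append(out_row)
--     return out_vars, reverse
-- ===== SOURCE B (Python) =====
-- def make_vars(board):
--     # build the REVERSE map first: flatten all cell coordinates in row-major
--     # order and number the flat list; then derive the forward grid from it
--     coords = [(y, x) for y, row in enumerate(board) for x, _ in enumerate(row)]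
--     reverse = dict(enumerate(coords, 1))
--     out_vars = [[] for _ in board]
--     for n, (y, _x) in reverse.items():
--         out_vars[y].append(n)
--     return out_vars, reverse
-- ===== Notes on version B (the rewrite author's own statement) =====
-- stated objective: alternative
-- what changed: A builds the forward grid with a running cell counter and fills the reverse dict as a side-effect of the same nested loop; B inverts the direction: it first flattens all coordinates row-major, builds the REVERSE map directly as dict(enumerate(coords, 1)), and then derives the forward grid from the reverse map by appending each id n at reverse[n]'s row.
import Mathlib
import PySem

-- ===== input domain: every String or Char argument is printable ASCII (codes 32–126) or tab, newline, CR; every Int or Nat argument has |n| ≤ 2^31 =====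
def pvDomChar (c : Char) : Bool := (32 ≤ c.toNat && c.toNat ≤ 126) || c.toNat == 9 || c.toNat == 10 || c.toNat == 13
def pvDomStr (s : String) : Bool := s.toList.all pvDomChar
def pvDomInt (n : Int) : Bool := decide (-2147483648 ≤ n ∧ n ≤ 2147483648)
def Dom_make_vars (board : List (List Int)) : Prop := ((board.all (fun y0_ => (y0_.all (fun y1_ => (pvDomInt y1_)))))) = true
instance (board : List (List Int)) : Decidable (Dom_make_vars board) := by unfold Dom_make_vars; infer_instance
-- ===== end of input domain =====

-- B builds the reverse map first from a flattened coordinate list and then derives the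
-- forward id grid from the reverse map (objective: alternative decomposition; same cost).


-- ===== PORT A =====
-- inner loop: for x, _ in enumerate(row): n += 1; out_row.append(n); reverse[n] = (y, x)
def aInner (y : Int) (x : Int) (n : Int) (outRow : List Int)
    (rev : PySem.Dict Int (Int × Int)) : List Int → Int × List Int × PySem.Dict Int (Int × Int)
  | [] => (n, outRow, rev)
  | _ :: rest => aInner y (x + 1) (n + 1) (outRow ++ [n + 1]) (rev.insert (n + 1) (y, x)) rest

-- outer loop: for y, row in enumerate(board): … ; out_vars.append(out_row)
def aOuter (y : Int) (n : Int) (outVars : List (List Int))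
    (rev : PySem.Dict Int (Int × Int)) : List (List Int) → List (List Int) × PySem.Dict Int (Int × Int)
  | [] => (outVars, rev)
  | row :: rest =>
    let r := aInner y 0 n [] rev row
    aOuter (y + 1) r.1 (outVars ++ [r.2.1]) r.2.2 rest

def make_vars (board : List (List Int)) : List (List Int) × (List (Int × Int × Int)) :=
  let r := aOuter 0 0 [] PySem.Dict.empty board
  (r.1, r.2.items)

-- ===== PORT B =====
-- comprehension: [(y, x) for y, row in enumerate(board) for x, _ in enumerate(row)]
def bRowCoords (y x : Int) : List Int → List (Int × Int)
  | [] => []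
  | _ :: rest => (y, x) :: bRowCoords y (x + 1) rest

def bCoords (y : Int) : List (List Int) → List (Int × Int)
  | [] => []
  | row :: rest => bRowCoords y 0 row ++ bCoords (y + 1) rest

-- enumerate(coords, 1)
def bEnum (i : Int) : List (Int × Int) → List (Int × Int × Int)
  | [] => []
  | c :: rest => (i, c) :: bEnum (i + 1) rest

-- out_vars[y].append(n); exact for 0 ≤ y < len(grid), which holds for every y this code
-- feeds it (ys come from enumerate(board))
def bAppendAt (y n : Int) : List (List Int) → List (List Int)
  | [] => []
  | r :: rest => if y = 0 then (r ++ [n]) :: rest else r :: bAppendAt (y - 1) n rest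

-- for n, (y, _x) in reverse.items(): out_vars[y].append(n)
def bFill (grid : List (List Int)) : List (Int × Int × Int) → List (List Int)
  | [] => grid
  | p :: rest => bFill (bAppendAt p.2.1 p.1 grid) rest

def make_vars_alt (board : List (List Int)) : List (List Int) × (List (Int × Int × Int)) :=
  let coords := bCoords 0 board
  let reverse := (bEnum 1 coords).foldl (fun d p => d.insert p.1 p.2) PySem.Dict.empty
  (bFill (board.map fun _ => []) reverse.items, reverse.items)

-- ===== PRECONDITION & SPEC =====
def Spec_make_vars (board : List (List Int)) (out : List (List Int) × (List (Int × Int × Int))) : Prop := out = make_vars_alt board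
instance (board : List (List Int)) (out : List (List Int) × (List (Int × Int × Int))) : Decidable (Spec_make_vars board out) := by unfold Spec_make_vars; infer_instance

-- ===== CLAIM (what is proved, stated in full; the proofs are below) =====
def Claim_equal_make_vars : Prop := ∀ (board : List (List Int)), Dom_make_vars board → Spec_make_vars board (make_vars board)

-- ===== LEMMAS AND PROOFS =====

-- the ids n+1, …, n+k
def idsL (n : Int) : Nat → List Int
  | 0 => []
  | k + 1 => (n + 1) :: idsL (n + 1) k

-- the (id, (y, x)) triples a row of length k receives, ids after n, xs from x
def tagsRow (n y x : Int) : Nat → List (Int × Int × Int)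
  | 0 => []
  | k + 1 => (n + 1, y, x) :: tagsRow (n + 1) y (x + 1) k

def tagsAll (n y : Int) : List (List Int) → List (Int × Int × Int)
  | [] => []
  | row :: rest => tagsRow n y 0 row.length ++ tagsAll (n + (row.length : Int)) (y + 1) rest

def blocksOf (n : Int) : List (List Int) → List (List Int)
  | [] => []
  | row :: rest => idsL n row.length :: blocksOf (n + (row.length : Int)) rest

theorem aInner_eq (row : List Int) : ∀ (y x n : Int) (outRow : List Int) (rev : PySem.Dict Int (Int × Int)),
    aInner y x n outRow rev row =
      (n + (row.length : Int), outRow ++ idsL n row.length,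
        (tagsRow n y x row.length).foldl (fun d p => d.insert p.1 p.2) rev) := by
  induction row with
  | nil => intro y x n outRow rev; simp [aInner, idsL, tagsRow]
  | cons a rest ih =>
    intro y x n outRow rev
    rw [aInner, ih]
    refine Prod.ext ?_ (Prod.ext ?_ ?_) <;> simp [idsL, tagsRow]
    omega

theorem aOuter_eq (board : List (List Int)) : ∀ (y n : Int) (outVars : List (List Int)) (rev : PySem.Dict Int (Int × Int)),
    aOuter y n outVars rev board =
      (outVars ++ blocksOf n board,
        (tagsAll n y board).foldl (fun d p => d.insert p.1 p.2) rev) := by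
  induction board with
  | nil => intro y n outVars rev; simp [aOuter, blocksOf, tagsAll]
  | cons row rest ih =>
    intro y n outVars rev
    rw [aOuter]
    simp only [aInner_eq, ih]
    simp [blocksOf, tagsAll, List.foldl_append]

theorem bEnum_append (xs ys : List (Int × Int)) : ∀ (i : Int),
    bEnum i (xs ++ ys) = bEnum i xs ++ bEnum (i + (xs.length : Int)) ys := by
  induction xs with
  | nil => intro i; simp [bEnum]
  | cons a xs ih =>
    intro i
    simp only [List.cons_append, bEnum, ih]
    have : i + (1 : Int) + (xs.length : Int) = i + ((xs.length : Int) + 1) := by ring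
    simp [this]

theorem bEnum_rowCoords (row : List Int) : ∀ (n y x : Int),
    bEnum (n + 1) (bRowCoords y x row) = tagsRow n y x row.length := by
  induction row with
  | nil => intro n y x; simp [bRowCoords, bEnum, tagsRow]
  | cons a rest ih =>
    intro n y x
    simp only [bRowCoords, bEnum, tagsRow, List.length_cons]
    rw [ih]

theorem bRowCoords_length : ∀ (row : List Int) (y x : Int), (bRowCoords y x row).length = row.length := by
  intro row
  induction row with
  | nil => intro y x; simp [bRowCoords]
  | cons a r ih => intro y x; simp [bRowCoords, ih]

theorem bEnum_coords (board : List (List Int)) : ∀ (n y : Int),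
    bEnum (n + 1) (bCoords y board) = tagsAll n y board := by
  induction board with
  | nil => intro n y; simp [bCoords, bEnum, tagsAll]
  | cons row rest ih =>
    intro n y
    simp only [bCoords, tagsAll, bEnum_append, bEnum_rowCoords]
    have : n + 1 + ((bRowCoords y 0 row).length : Int) = (n + (row.length : Int)) + 1 := by
      rw [bRowCoords_length]; ring
    rw [this, ih]

theorem tagsRow_fst_bound : ∀ (k : Nat) (n y x : Int) (p : Int × Int × Int),
    p ∈ tagsRow n y x k → n < p.1 ∧ p.1 ≤ n + k := by
  intro k
  induction k with
  | zero => intro n y x p h; simp [tagsRow] at h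
  | succ k ih =>
    intro n y x p h
    simp only [tagsRow, List.mem_cons] at h
    rcases h with h | h
    · subst h; constructor <;> simp
    · have := ih (n + 1) y (x + 1) p h
      push_cast
      omega

theorem tagsAll_fst_bound : ∀ (board : List (List Int)) (n y : Int) (p : Int × Int × Int),
    p ∈ tagsAll n y board → n < p.1 := by
  intro board
  induction board with
  | nil => intro n y p h; simp [tagsAll] at h
  | cons row rest ih =>
    intro n y p h
    simp only [tagsAll, List.mem_append] at h
    rcases h with h | h
    · exact (tagsRow_fst_bound _ n y 0 p h).1
    · have := ih (n + (row.length : Int)) (y + 1) p h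
      omega

theorem tagsRow_fst_nodup : ∀ (k : Nat) (n y x : Int),
    ((tagsRow n y x k).map (·.1)).Nodup := by
  intro k
  induction k with
  | zero => intro n y x; simp [tagsRow]
  | succ k ih =>
    intro n y x
    simp only [tagsRow, List.map_cons, List.nodup_cons]
    refine ⟨?_, ih (n + 1) y (x + 1)⟩
    intro h
    rcases List.mem_map.mp h with ⟨p, hp, hfst⟩
    have := tagsRow_fst_bound k (n + 1) y (x + 1) p hp
    omega

theorem tagsAll_fst_nodup : ∀ (board : List (List Int)) (n y : Int),
    ((tagsAll n y board).map (·.1)).Nodup := by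
  intro board
  induction board with
  | nil => intro n y; simp [tagsAll]
  | cons row rest ih =>
    intro n y
    rw [tagsAll, List.map_append, List.nodup_append]
    refine ⟨tagsRow_fst_nodup _ n y 0, ih _ _, ?_⟩
    intro a ha b hb hab
    rcases List.mem_map.mp ha with ⟨p, hp, rfl⟩
    rcases List.mem_map.mp hb with ⟨q, hq, rfl⟩
    have h1 := tagsRow_fst_bound _ n y 0 p hp
    have h2 := tagsAll_fst_bound _ _ _ q hq
    rw [hab] at h1
    omega

theorem items_tags (l : List (Int × Int × Int)) (hnd : (l.map (·.1)).Nodup) :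
    (l.foldl (fun d p => d.insert p.1 p.2) PySem.Dict.empty).items = l := by
  have h := PySem.Dict.items_foldl_insert_fresh (l := l) (k := fun p => p.1) (v := fun p => p.2)
      (d := PySem.Dict.empty) (by intro a _; simp) hnd
  simpa using h

theorem appendAt_at : ∀ (pre : List (List Int)) (cur : List Int) (rest : List (List Int)) (n : Int),
    bAppendAt (pre.length : Int) n (pre ++ cur :: rest) = pre ++ (cur ++ [n]) :: rest := by
  intro pre
  induction pre with
  | nil => intro cur rest n; simp [bAppendAt]
  | cons h t ih =>
    intro cur rest n
    simp only [List.cons_append, bAppendAt, List.length_cons]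
    have hne : ((t.length : Int) + 1) ≠ 0 := by omega
    push_cast
    rw [if_neg hne]
    have : (t.length : Int) + 1 - 1 = (t.length : Int) := by ring
    rw [this, ih]

theorem fill_row : ∀ (k : Nat) (n x : Int) (pre : List (List Int)) (cur : List Int)
    (rest : List (List Int)) (more : List (Int × Int × Int)),
    bFill (pre ++ cur :: rest) (tagsRow n (pre.length : Int) x k ++ more) =
      bFill (pre ++ (cur ++ idsL n k) :: rest) more := by
  intro k
  induction k with
  | zero => intro n x pre cur rest more; simp [tagsRow, idsL]
  | succ k ih =>
    intro n x pre cur rest more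
    simp only [tagsRow, List.cons_append, bFill, appendAt_at]
    rw [ih (n + 1) (x + 1) pre (cur ++ [n + 1]) rest more]
    simp [idsL]

theorem fill_all : ∀ (board : List (List Int)) (n : Int) (pre : List (List Int)),
    bFill (pre ++ board.map (fun _ => ([] : List Int))) (tagsAll n (pre.length : Int) board) =
      pre ++ blocksOf n board := by
  intro board
  induction board with
  | nil => intro n pre; simp [tagsAll, blocksOf, bFill]
  | cons row rest ih =>
    intro n pre
    simp only [List.map_cons, tagsAll]
    rw [fill_row row.length n 0 pre [] (rest.map fun _ => []) _]
    simp only [List.nil_append]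
    have h1 : pre ++ idsL n row.length :: rest.map (fun _ => ([] : List Int)) =
        (pre ++ [idsL n row.length]) ++ rest.map (fun _ => ([] : List Int)) := by simp
    have h2 : (pre.length : Int) + 1 = (((pre ++ [idsL n row.length]).length : Int)) := by
      simp
    rw [h1, h2, ih (n + (row.length : Int)) (pre ++ [idsL n row.length])]
    simp [blocksOf]

-- ===== VERDICT (by name: the statement is the Claim_ definition above) =====
theorem make_vars_spec : Claim_equal_make_vars := by
  intro board _
  show _ = _
  have hb : bEnum 1 (bCoords 0 board) = tagsAll 0 0 board := by
    simpa using bEnum_coords board 0 0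
  simp only [make_vars, make_vars_alt, aOuter_eq, hb,
    items_tags _ (tagsAll_fst_nodup board 0 0)]
  refine Prod.ext ?_ rfl
  simpa using (fill_all board 0 []).symm
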